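-- pv_equiv track=rewrite | github.com/asamassekou10/resumatch-ai | backend/email_service.py | _format_keywords_grid
-- ===== SOURCE A (Python) =====
-- from typing import Optional, List
--
-- def _format_keywords_grid(keywords: List[str], keyword_type: str) -> str:
--     """Format keywords in a grid layout with 5 keywords per line"""
--     if not keywords:
--         return f"<div class='keyword {keyword_type}'>None found</div>"
--
--     # Limit to 20 keywords
--     display_keywords = keywords[:20]
--     keyword_html = ""
--
--     for i, keyword in enumerate(display_keywords):
--         # Truncate very long keywords
--         display_keyword = keyword if len(keyword) <= 25 else keyword[:22] + "..."
--         keyword_html += f"<div class='keyword {keyword_type}'>{display_keyword}</div>"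
--
--         # Add line break after every 5 keywords (but not after the last one)
--         if (i + 1) % 5 == 0 and (i + 1) < len(display_keywords):
--             keyword_html += "<div style='width: 100%; height: 0;'></div>"
--
--     if len(keywords) > 20:
--         remaining = len(keywords) - 20
--         keyword_html += f"<div class='keyword' style='background-color: #e2e8f0; color: #475569;'>+{remaining} more</div>"
--
--     return keyword_html
-- ===== SOURCE B (Python) =====
-- from typing import List
--
-- def _format_keywords_grid(keywords: List[str], keyword_type: str) -> str:
--     """Format keywords in a grid layout with 5 keywords per line (chunked rows)."""
--     if not keywords:
--         return f"<div class='keyword {keyword_type}'>None found</div>"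
--
--     display_keywords = keywords[:20]
--
--     def cell(keyword):
--         display_keyword = keyword if len(keyword) <= 25 else keyword[:22] + "..."
--         return f"<div class='keyword {keyword_type}'>{display_keyword}</div>"
--
--     rows = [display_keywords[i:i + 5] for i in range(0, len(display_keywords), 5)]
--     html = "<div style='width: 100%; height: 0;'></div>".join(
--         "".join(cell(k) for k in row) for row in rows
--     )
--
--     if len(keywords) > 20:
--         html += f"<div class='keyword' style='background-color: #e2e8f0; color: #475569;'>+{len(keywords) - 20} more</div>"
--
--     return html
-- ===== Notes on version B (the rewrite author's own statement) =====
-- stated objective: alternative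
-- what changed: Replaces the single indexed loop with modulo-tested inline separators by chunking the displayed keywords into rows of 5 and joining per-row cell strings with the separator string.
import Mathlib
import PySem

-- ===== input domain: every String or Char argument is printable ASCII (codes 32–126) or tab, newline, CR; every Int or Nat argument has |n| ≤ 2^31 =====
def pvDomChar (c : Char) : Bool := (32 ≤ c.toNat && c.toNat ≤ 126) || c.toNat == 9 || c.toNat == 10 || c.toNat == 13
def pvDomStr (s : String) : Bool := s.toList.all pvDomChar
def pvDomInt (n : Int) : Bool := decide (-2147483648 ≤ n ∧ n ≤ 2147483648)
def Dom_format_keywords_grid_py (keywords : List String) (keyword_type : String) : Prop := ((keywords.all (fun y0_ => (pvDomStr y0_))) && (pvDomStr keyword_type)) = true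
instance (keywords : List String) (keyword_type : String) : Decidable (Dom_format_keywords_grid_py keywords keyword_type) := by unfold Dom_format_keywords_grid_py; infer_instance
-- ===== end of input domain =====

-- B chunks the displayed keywords into rows of 5 and joins per-row HTML with the separator,
-- instead of A's single indexed loop with a modulo test; objective: alternative (same cost).

-- shared HTML pieces (identical literal text in both Pythons)
def pvSep : String := "<div style='width: 100%; height: 0;'></div>"

def pvCell (keyword_type keyword : String) : String :=
  let display_keyword :=
    if PySem.Str.len keyword ≤ 25 then keyword
    else PySem.Str.slice keyword none (some 22) ++ "..."
  "<div class='keyword " ++ keyword_type ++ "'>" ++ display_keyword ++ "</div>"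

def pvMore (remaining : Int) : String :=
  "<div class='keyword' style='background-color: #e2e8f0; color: #475569;'>+" ++
    PySem.Int.toStr remaining ++ " more</div>"

-- ===== PORT A =====
def format_keywords_grid_py (keywords : List String) (keyword_type : String) : String :=
  if keywords = [] then "<div class='keyword " ++ keyword_type ++ "'>None found</div>"
  else
    let display_keywords := PySem.List.slice keywords none (some 20)
    let keyword_html :=
      (PySem.List.enumerate display_keywords 0).foldl
        (fun acc p =>
          let acc := acc ++ pvCell keyword_type p.2
          if PySem.Int.mod (p.1 + 1) 5 = 0 ∧ p.1 + 1 < (display_keywords.length : Int) then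
            acc ++ pvSep
          else acc)
        ""
    if (keywords.length : Int) > 20 then
      keyword_html ++ pvMore ((keywords.length : Int) - 20)
    else keyword_html

-- ===== PORT B =====
-- "".join over a row of cells
def pvConcat : List String → String
  | [] => ""
  | s :: t => s ++ pvConcat t

-- sep.join over the row strings
def pvSepJoin : List String → String
  | [] => ""
  | [r] => r
  | r :: s :: t => r ++ pvSep ++ pvSepJoin (s :: t)

-- rows of 5: [display_keywords[i:i+5] for i in range(0, len, 5)]
def pvChunks5 : List String → List (List String)
  | [] => []
  | x :: rest => (x :: rest).take 5 :: pvChunks5 (rest.drop 4)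
termination_by l => l.length
decreasing_by simp [List.length_drop]

def format_keywords_grid_py_alt (keywords : List String) (keyword_type : String) : String :=
  if keywords = [] then "<div class='keyword " ++ keyword_type ++ "'>None found</div>"
  else
    let display_keywords := PySem.List.slice keywords none (some 20)
    let rows := pvChunks5 display_keywords
    let html := pvSepJoin (rows.map (fun row => pvConcat (row.map (pvCell keyword_type))))
    if (keywords.length : Int) > 20 then
      html ++ pvMore ((keywords.length : Int) - 20)
    else html

-- ===== PRECONDITION & SPEC =====
def Spec_format_keywords_grid_py (keywords : List String) (keyword_type : String) (out : String) : Prop := out = format_keywords_grid_py_alt keywords keyword_type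
instance (keywords : List String) (keyword_type : String) (out : String) : Decidable (Spec_format_keywords_grid_py keywords keyword_type out) := by unfold Spec_format_keywords_grid_py; infer_instance

-- ===== CLAIM (what is proved, stated in full; the proofs are below) =====
def Claim_equal_format_keywords_grid_py : Prop := ∀ (keywords : List String) (keyword_type : String), Dom_format_keywords_grid_py keywords keyword_type → Spec_format_keywords_grid_py keywords keyword_type (format_keywords_grid_py keywords keyword_type)

-- ===== LEMMAS AND PROOFS =====

-- A's loop body as a structural recursion (i = current index, n = len(display_keywords))
def pvGoA (keyword_type : String) : List String → Int → Int → String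
  | [], _, _ => ""
  | k :: r, i, n =>
      pvCell keyword_type k ++
        (if PySem.Int.mod (i + 1) 5 = 0 ∧ i + 1 < n then pvSep else "") ++
        pvGoA keyword_type r (i + 1) n

theorem pvFoldl_eq_goA (kt : String) (l : List String) (i : Int) (a : String) (n : Int) :
    (PySem.List.enumerate l i).foldl
        (fun acc p =>
          let acc := acc ++ pvCell kt p.2
          if PySem.Int.mod (p.1 + 1) 5 = 0 ∧ p.1 + 1 < n then acc ++ pvSep else acc)
        a
      = a ++ pvGoA kt l i n := by
  induction l generalizing i a with
  | nil => simp [PySem.List.enumerate, pvGoA]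
  | cons x xs ih =>
      show (PySem.List.enumerate xs (i+1)).foldl _ _ = _
      rw [ih]
      simp only [pvGoA]
      split_ifs <;> simp [String.append_assoc, String.append_empty]

theorem pvChunks5_nil : pvChunks5 [] = [] := by rw [pvChunks5]

theorem pvChunks5_cons (x : String) (rest : List String) :
    pvChunks5 (x :: rest) = (x :: rest).take 5 :: pvChunks5 (rest.drop 4) := by
  rw [pvChunks5]

-- a stretch of the loop that fires no separator is just the concatenation of its cells
theorem pvGoA_no_sep (kt : String) (l : List String) :
    ∀ (i n : Int),
      (∀ j : Nat, j < l.length → ¬ (PySem.Int.mod (i + 1 + j) 5 = 0 ∧ i + 1 + (j : Int) < n)) →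
      pvGoA kt l i n = pvConcat (l.map (pvCell kt)) := by
  induction l with
  | nil => intro i n _; simp [pvGoA, pvConcat]
  | cons x xs ih =>
      intro i n h
      have h0 : ¬ (PySem.Int.mod (i + 1) 5 = 0 ∧ i + 1 < n) := by
        have := h 0 (by simp)
        simpa using this
      simp only [pvGoA, if_neg h0, List.map_cons, pvConcat]
      rw [ih (i + 1) n]
      · simp
      · intro j hj
        have := h (j + 1) (by simpa using Nat.succ_lt_succ hj)
        push_cast at this ⊢
        convert this using 3 <;> ring_nf
        
theorem pvGoA_main (kt : String) (N : Nat) :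
    ∀ (l : List String) (i : Int), l.length ≤ N → 0 ≤ i → (5 : Int) ∣ i →
      pvGoA kt l i (i + l.length)
        = pvSepJoin ((pvChunks5 l).map (fun row => pvConcat (row.map (pvCell kt)))) := by
  induction N with
  | zero =>
      intro l i hl _ _
      have : l = [] := List.length_eq_zero_iff.mp (Nat.le_zero.mp hl)
      subst this
      simp [pvGoA, pvChunks5_nil, pvSepJoin]
  | succ N ih =>
      intro l i hl hi hdvd
      by_cases hsmall : l.length ≤ 5
      · -- at most one row: no separator fires
        match l with
        | [] => simp [pvGoA, pvChunks5_nil, pvSepJoin]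
        | x :: rest =>
            have hrest : rest.length ≤ 4 := by simp at hsmall; omega
            have hdrop : rest.drop 4 = [] := by
              apply List.eq_nil_of_length_eq_zero; simp [List.length_drop]; omega
            have htake : (x :: rest).take 5 = x :: rest := by
              apply List.take_of_length_le; simpa using hsmall
            rw [pvGoA_no_sep kt (x :: rest) i (i + (x :: rest).length)]
            · rw [pvChunks5_cons, hdrop, pvChunks5_nil, htake]
              simp [pvSepJoin]
            · intro j hj
              rintro ⟨hm, hlt⟩
              rw [PySem.Int.mod_eq_zero_iff_dvd] at hm
              simp only [List.length_cons] at hj hlt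
              omega
      · -- a full row of five, then the rest
        obtain ⟨a, b, c, d, e, rest, rfl⟩ : ∃ a b c d e rest, l = a :: b :: c :: d :: e :: rest := by
          rcases l with _|⟨a,_|⟨b,_|⟨c,_|⟨d,_|⟨e,rest⟩⟩⟩⟩⟩ <;>
            first
              | exact ⟨_, _, _, _, _, _, rfl⟩
              | (exfalso; apply hsmall; simp)
        have hrne : rest ≠ [] := by
          intro h; subst h; simp at hsmall
        have h1 : ¬ (PySem.Int.mod (i + 1) 5 = 0 ∧ (i + 1 : Int) < i + (a :: b :: c :: d :: e :: rest).length) := by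
          rintro ⟨hm, _⟩; rw [PySem.Int.mod_eq_zero_iff_dvd] at hm; omega
        have h2 : ¬ (PySem.Int.mod (i + 1 + 1) 5 = 0 ∧ (i + 1 + 1 : Int) < i + (a :: b :: c :: d :: e :: rest).length) := by
          rintro ⟨hm, _⟩; rw [PySem.Int.mod_eq_zero_iff_dvd] at hm; omega
        have h3 : ¬ (PySem.Int.mod (i + 1 + 1 + 1) 5 = 0 ∧ (i + 1 + 1 + 1 : Int) < i + (a :: b :: c :: d :: e :: rest).length) := by
          rintro ⟨hm, _⟩; rw [PySem.Int.mod_eq_zero_iff_dvd] at hm; omega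
        have h4 : ¬ (PySem.Int.mod (i + 1 + 1 + 1 + 1) 5 = 0 ∧ (i + 1 + 1 + 1 + 1 : Int) < i + (a :: b :: c :: d :: e :: rest).length) := by
          rintro ⟨hm, _⟩; rw [PySem.Int.mod_eq_zero_iff_dvd] at hm; omega
        have h5 : (PySem.Int.mod (i + 1 + 1 + 1 + 1 + 1) 5 = 0 ∧ (i + 1 + 1 + 1 + 1 + 1 : Int) < i + (a :: b :: c :: d :: e :: rest).length) := by
          constructor
          · rw [PySem.Int.mod_eq_zero_iff_dvd]; omega
          · have : 1 ≤ rest.length := List.length_pos_iff.mpr hrne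
            simp only [List.length_cons]
            push_cast
            omega
        simp only [pvGoA, if_neg h1, if_neg h2, if_neg h3, if_neg h4, if_pos h5]
        have hrec : pvGoA kt rest (i + 1 + 1 + 1 + 1 + 1) (i + (a :: b :: c :: d :: e :: rest).length)
            = pvSepJoin ((pvChunks5 rest).map (fun row => pvConcat (row.map (pvCell kt)))) := by
          have hn : (i + ((a :: b :: c :: d :: e :: rest).length : Int)) = (i + 1 + 1 + 1 + 1 + 1) + rest.length := by
            simp only [List.length_cons]; push_cast; ring
          rw [hn]
          exact ih rest (i + 1 + 1 + 1 + 1 + 1) (by simp at hl; omega) (by omega) (by omega)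
        rw [hrec]
        -- right-hand side: first chunk is the five, the rest chunked after
        rw [pvChunks5_cons]
        have : (b :: c :: d :: e :: rest).drop 4 = rest := by simp
        rw [this]
        obtain ⟨r0, rtl, hr⟩ : ∃ r0 rtl, pvChunks5 rest = r0 :: rtl := by
          match rest, hrne with
          | x :: xs, _ => exact ⟨_, _, pvChunks5_cons x xs⟩
        rw [hr]
        simp [pvSepJoin, pvConcat, String.append_assoc, String.append_empty]

-- ===== VERDICT (by name: the statement is the Claim_ definition above) =====
theorem format_keywords_grid_py_spec : Claim_equal_format_keywords_grid_py := by
  intro keywords keyword_type _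
  unfold Spec_format_keywords_grid_py format_keywords_grid_py format_keywords_grid_py_alt
  by_cases hk : keywords = []
  · simp [hk]
  · simp only [if_neg hk]
    rw [pvFoldl_eq_goA]
    rw [String.empty_append]
    have hi0 : ((PySem.List.slice keywords none (some 20)).length : Int)
        = (0 : Int) + (PySem.List.slice keywords none (some 20)).length := by ring
    rw [hi0, pvGoA_main keyword_type (PySem.List.slice keywords none (some 20)).length
          (PySem.List.slice keywords none (some 20)) 0 le_rfl le_rfl ⟨0, by ring⟩]
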